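-- pv_equiv track=rewrite | github.com/litiblue/topcoder | Junseok/srm/628/CircuitsConstruction.py | maximizeResistance
-- ===== SOURCE A (Python) =====
-- def maximizeResistance(circuit, conductors):
--     s = []
--     for ch in circuit[::-1]:
--         if ch == 'X':
--             s.append(1)
--         else:
--             p = s.pop()
--             q = s.pop()
--             if ch == 'A':
--                 s.append(p + q)
--             else:
--                 s.append(max([p,q]))
--
--     cnt = s.pop()
--     return sum(sorted(conductors, reverse=True)[:cnt])
-- ===== SOURCE B (Python) =====
-- def maximizeResistance(circuit, conductors):
--     # recursive-descent parse of the prefix expression: parse(i) -> (count, next index)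
--     def parse(i):
--         ch = circuit[i]
--         if ch == 'X':
--             return 1, i + 1
--         p, j = parse(i + 1)
--         q, k = parse(j)
--         return (p + q if ch == 'A' else max(p, q)), k
--     cnt, _ = parse(0)
--     return sum(sorted(conductors, reverse=True)[:cnt])
-- ===== Notes on version B (the rewrite author's own statement) =====
-- stated objective: alternative
-- what changed: Replaced A's reversed scan with an explicit value stack by a recursive-descent parser over the prefix expression (parse(i) returns (count, next index)); the final sum of the cnt largest conductors is unchanged.
-- outside the precondition, e.g. on maximizeResistance('AXXA', [1, 2]): A raises IndexError, B returns 3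
import Mathlib
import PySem

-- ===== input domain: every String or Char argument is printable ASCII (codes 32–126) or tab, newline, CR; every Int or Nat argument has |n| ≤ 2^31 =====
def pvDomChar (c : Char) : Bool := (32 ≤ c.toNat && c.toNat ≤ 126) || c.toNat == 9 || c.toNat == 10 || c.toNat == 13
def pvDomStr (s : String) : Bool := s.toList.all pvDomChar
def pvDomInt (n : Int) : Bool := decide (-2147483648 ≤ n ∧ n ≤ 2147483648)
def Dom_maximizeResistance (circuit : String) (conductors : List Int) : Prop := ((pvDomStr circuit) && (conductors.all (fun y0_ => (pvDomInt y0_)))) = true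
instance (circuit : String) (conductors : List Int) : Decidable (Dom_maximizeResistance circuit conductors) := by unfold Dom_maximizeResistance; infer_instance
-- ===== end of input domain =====

-- B replaces A's reversed-scan explicit-stack evaluation by a recursive-descent parser
-- over the prefix expression (objective: alternative decomposition, same cost).

-- ===== PORT A =====
-- one step of A's loop body: the Option threads the IndexError of s.pop()
def stepA (s : Option (List Int)) (ch : Char) : Option (List Int) :=
  match s with
  | none => none
  | some s =>
    if ch = 'X' then some ((1 : Int) :: s)
    else
      match s with
      | p :: q :: rest => some ((if ch = 'A' then p + q else max p q) :: rest)
      | _ => none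

def maximizeResistance (circuit : String) (conductors : List Int) : Int :=
  match circuit.toList.reverse.foldl stepA (some []) with
  | some (cnt :: _) =>
      (PySem.List.slice (PySem.List.sorted conductors (fun x => x) true) none (some cnt)).sum
  | _ => 0  -- Python raises IndexError here; excluded by Pre_maximizeResistance

-- ===== PORT B =====
-- parse(i) of Source B: returns (count, remaining input); fuel only makes the recursion total,
-- fuel = input length always suffices on successful parses
def parseB (fuel : Nat) (cs : List Char) : Option (Int × List Char) :=
  match fuel, cs with
  | 0, _ => none
  | _, [] => none
  | f + 1, ch :: rest =>
    if ch = 'X' then some ((1 : Int), rest)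
    else
      match parseB f rest with
      | none => none
      | some (p, r1) =>
        match parseB f r1 with
        | none => none
        | some (q, r2) => some ((if ch = 'A' then p + q else max p q), r2)

def maximizeResistance_alt (circuit : String) (conductors : List Int) : Int :=
  match parseB circuit.toList.length circuit.toList with
  | some (cnt, _) =>
      (PySem.List.slice (PySem.List.sorted conductors (fun x => x) true) none (some cnt)).sum
  | none => 0  -- Python raises IndexError here; excluded by Pre_maximizeResistance

-- ===== PRECONDITION & SPEC =====
-- #('X') minus #(operators) in a suffix = A's stack height after scanning that suffix
def bal (t : List Char) : Int :=
  (t.countP (fun c => c = 'X') : Int) - (t.countP (fun c => ¬ (c = 'X')) : Int)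

-- Pre_ excludes exactly the inputs where A raises IndexError (stack underflow at an
-- operator, or an empty final stack): every operator must see two operands behind it.
def Pre_maximizeResistance (circuit : String) (conductors : List Int) : Prop :=
  1 ≤ bal circuit.toList ∧
  ∀ t ∈ circuit.toList.tails, t ≠ [] → t.headI ≠ 'X' → 2 ≤ bal t.tail

instance (circuit : String) (conductors : List Int) : Decidable (Pre_maximizeResistance circuit conductors) := by
  unfold Pre_maximizeResistance; infer_instance

def pvWitness_maximizeResistance : String × List Int := ("AXSXX", [5, -2, 7])

def Spec_maximizeResistance (circuit : String) (conductors : List Int) (out : Int) : Prop := out = maximizeResistance_alt circuit conductors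
instance (circuit : String) (conductors : List Int) (out : Int) : Decidable (Spec_maximizeResistance circuit conductors out) := by unfold Spec_maximizeResistance; infer_instance

-- ===== CLAIM (what is proved, stated in full; the proofs are below) =====
def Claim_equal_maximizeResistance : Prop := ∀ (circuit : String) (conductors : List Int), Dom_maximizeResistance circuit conductors → Pre_maximizeResistance circuit conductors → Spec_maximizeResistance circuit conductors (maximizeResistance circuit conductors)

-- ===== LEMMAS AND PROOFS =====

-- ParseR cs v rest: Source B's parse, as a relation (value v, unread suffix rest)
inductive ParseR : List Char → Int → List Char → Prop
  | X (rest : List Char) : ParseR ('X' :: rest) 1 rest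
  | op (ch : Char) (rest : List Char) (p : Int) (r1 : List Char) (q : Int) (r2 : List Char) :
      ch ≠ 'X' → ParseR rest p r1 → ParseR r1 q r2 →
      ParseR (ch :: rest) (if ch = 'A' then p + q else max p q) r2

-- Chain cs vs: cs is a concatenation of complete prefix expressions with values vs (A's final stack)
inductive Chain : List Char → List Int → Prop
  | nil : Chain [] []
  | cons (cs : List Char) (v : Int) (rest : List Char) (vs : List Int) :
      ParseR cs v rest → Chain rest vs → Chain cs (v :: vs)

theorem ParseR_length_lt {cs : List Char} {v : Int} {rest : List Char}
    (h : ParseR cs v rest) : rest.length < cs.length := by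
  induction h with
  | X rest => simp
  | op ch rest p r1 q r2 hch h1 h2 ih1 ih2 => simp; omega

theorem parseB_of_ParseR {cs : List Char} {v : Int} {rest : List Char}
    (h : ParseR cs v rest) : ∀ f, cs.length ≤ f → parseB f cs = some (v, rest) := by
  induction h with
  | X rest =>
    intro f hf
    match f with
    | f + 1 => simp [parseB]
  | op ch rest p r1 q r2 hch h1 h2 ih1 ih2 =>
    intro f hf
    match f with
    | f + 1 =>
      have hl1 := ParseR_length_lt h1
      have hl2 := ParseR_length_lt h2
      have e1 : parseB f rest = some (p, r1) := ih1 f (by simp at hf; omega)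
      have e2 : parseB f r1 = some (q, r2) := ih2 f (by simp at hf; omega)
      simp [parseB, hch, e1, e2]

theorem chain_of_foldl :
    ∀ (cs : List Char) (S' : List Int),
      cs.reverse.foldl stepA (some []) = some S' → Chain cs S' := by
  intro cs
  induction cs with
  | nil => intro S' h; simp at h; subst h; exact Chain.nil
  | cons c cs' ih =>
    intro S' h
    rw [List.reverse_cons, List.foldl_append] at h
    simp only [List.foldl_cons, List.foldl_nil] at h
    rcases hS : cs'.reverse.foldl stepA (some []) with _ | S''
    · rw [hS] at h; simp [stepA] at h
    · rw [hS] at h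
      have hch := ih S'' hS
      by_cases hx : c = 'X'
      · simp [stepA, hx] at h
        subst hx
        rw [← h]
        exact Chain.cons _ _ _ _ (ParseR.X cs') hch
      · simp [stepA, hx] at h
        match S'', hch with
        | p :: q :: t, hch =>
          simp at h
          cases hch with
          | cons _ _ rest vs hp hch' =>
            cases hch' with
            | cons _ _ rest2 vs2 hq hch'' =>
              rw [← h]
              exact Chain.cons _ _ _ _ (ParseR.op c cs' p rest q rest2 hx hp hq) hch''

theorem bal_cons (c : Char) (t : List Char) :
    bal (c :: t) = (if c = 'X' then 1 else -1) + bal t := by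
  simp [bal, List.countP_cons]
  by_cases hx : c = 'X' <;> simp [hx] <;> omega

theorem foldl_some_of_ok :
    ∀ (cs : List Char),
      (∀ t ∈ cs.tails, t ≠ [] → t.headI ≠ 'X' → 2 ≤ bal t.tail) →
      ∃ S' : List Int, cs.reverse.foldl stepA (some []) = some S' ∧ (S'.length : Int) = bal cs := by
  intro cs
  induction cs with
  | nil => intro _; exact ⟨[], by simp, by simp [bal]⟩
  | cons c cs' ih =>
    intro hok
    have hok' : ∀ t ∈ cs'.tails, t ≠ [] → t.headI ≠ 'X' → 2 ≤ bal t.tail := by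
      intro t ht
      exact hok t (by rw [List.tails_cons]; exact List.mem_cons_of_mem _ ht)
    obtain ⟨S'', hS, hlen⟩ := ih hok'
    rw [List.reverse_cons, List.foldl_append]
    simp only [List.foldl_cons, List.foldl_nil]
    rw [hS]
    by_cases hx : c = 'X'
    · refine ⟨(1 : Int) :: S'', by simp [stepA, hx], ?_⟩
      rw [bal_cons]; simp [hx]; omega
    · have hself : 2 ≤ bal cs' := by
        have := hok (c :: cs') (by rw [List.tails_cons]; exact List.mem_cons_self)
        simpa [hx] using this
      match S'', hlen with
      | p :: q :: t, hlen =>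
        refine ⟨(if c = 'A' then p + q else max p q) :: t, by simp [stepA, hx], ?_⟩
        rw [bal_cons]; simp [hx] at *; omega
      | [], hlen => exfalso; simp at hlen; omega
      | [p], hlen => exfalso; simp at hlen; omega

theorem Chain_head {cs : List Char} {v : Int} {vs : List Int}
    (h : Chain cs (v :: vs)) : ∃ rest, ParseR cs v rest := by
  cases h with
  | cons _ _ rest _ hp _ => exact ⟨rest, hp⟩

-- ===== VERDICT (by name: the statement is the Claim_ definition above) =====
theorem maximizeResistance_spec : Claim_equal_maximizeResistance := by
  intro circuit conductors _hdom hpre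
  obtain ⟨hbal, hok⟩ := hpre
  obtain ⟨S', hS, hlen⟩ := foldl_some_of_ok circuit.toList hok
  cases S' with
  | nil => exfalso; simp at hlen; omega
  | cons cnt stail =>
    obtain ⟨rest, hp⟩ := Chain_head (chain_of_foldl circuit.toList (cnt :: stail) hS)
    have hB := parseB_of_ParseR hp circuit.toList.length (le_refl _)
    unfold Spec_maximizeResistance maximizeResistance maximizeResistance_alt
    rw [hS, hB]
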